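-- pv_equiv track=rewrite | github.com/amshrestha2020/CodeSignal | CodeSignal/Core/SwapDiagonals.py | solution
-- ===== SOURCE A (Python) =====
-- def solution(matrix):
--     start = 0
--     end = len(matrix) - 1
--
--     while end - start >= 1:
--         topLeft = matrix[start][start]
--         bottomLeft = matrix[end][start]
--
--         matrix[start][start] = matrix[start][end]
--         matrix[start][end] = topLeft
--
--         matrix[end][start] = matrix[end][end]
--         matrix[end][end] = bottomLeft
--
--         start += 1
--         end -= 1
--
--     return matrix
-- ===== SOURCE B (Python) =====
-- def solution(matrix):
--     n = len(matrix)
--     return [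
--         [row[n - 1 - i] if j == i else row[i] if j == n - 1 - i else x
--          for j, x in enumerate(row)]
--         for i, row in enumerate(matrix)
--     ]
-- ===== Notes on version B (the rewrite author's own statement) =====
-- stated objective: alternative
-- what changed: Replaced A's in-place converging two-pointer loop (four assignments across the top and bottom rows per iteration) by a pure rebuild: a nested index-aware comprehension that selects each output element (row[n-1-i] at column i, row[i] at column n-1-i, the element itself elsewhere); B does not mutate the input, so the equivalence is about the return value.
import Mathlib
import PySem

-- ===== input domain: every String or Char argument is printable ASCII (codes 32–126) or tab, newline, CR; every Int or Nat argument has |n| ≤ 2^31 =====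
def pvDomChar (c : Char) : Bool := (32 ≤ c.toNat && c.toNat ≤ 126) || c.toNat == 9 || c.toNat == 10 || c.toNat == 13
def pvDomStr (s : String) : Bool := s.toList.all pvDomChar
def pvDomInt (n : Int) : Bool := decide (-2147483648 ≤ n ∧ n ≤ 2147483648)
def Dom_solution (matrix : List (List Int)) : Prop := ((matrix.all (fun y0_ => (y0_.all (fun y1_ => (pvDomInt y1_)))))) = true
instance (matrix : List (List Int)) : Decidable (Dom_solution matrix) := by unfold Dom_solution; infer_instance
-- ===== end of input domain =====

-- B rebuilds the matrix purely, selecting every output element by its index pair, instead of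
-- A's in-place converging two-pointer mutation (alternative decomposition, same cost).
-- Python A mutates `matrix` in place, B does not; the equivalence is about the return value.

-- ===== PORT A =====
-- one iteration of A's while-body: the four sequential element assignments
def swapOnce (m : List (List Int)) (s e : Nat) : List (List Int) :=
  let topLeft := (m.getD s []).getD s 0
  let bottomLeft := (m.getD e []).getD s 0
  let m1 := m.set s ((m.getD s []).set s ((m.getD s []).getD e 0))
  let m2 := m1.set s ((m1.getD s []).set e topLeft)
  let m3 := m2.set e ((m2.getD e []).set s ((m2.getD e []).getD e 0))
  m3.set e ((m3.getD e []).set e bottomLeft)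

-- A's while loop (end - start >= 1)
def loopA (m : List (List Int)) (s e : Nat) : List (List Int) :=
  if s < e then loopA (swapOnce m s e) (s + 1) (e - 1) else m
termination_by e - s
decreasing_by omega

def solution (matrix : List (List Int)) : List (List Int) :=
  loopA matrix 0 (matrix.length - 1)

-- ===== PORT B =====
-- Source B's inner comprehension: element at column j of row i becomes row[n-1-i] at j = i,
-- row[i] at j = n-1-i, and is copied unchanged elsewhere (enumerate ↦ mapIdx)
def bRow (n i : Nat) (row : List Int) : List Int :=
  row.mapIdx (fun j x =>
    if j = i then row.getD (n - 1 - i) 0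
    else if j = n - 1 - i then row.getD i 0
    else x)

def solution_alt (matrix : List (List Int)) : List (List Int) :=
  matrix.mapIdx (fun i row => bRow matrix.length i row)

-- ===== PRECONDITION & SPEC =====
-- Pre_ excludes exactly the inputs on which Python A raises IndexError: every row i that is
-- not the middle row of an odd-sized matrix must reach both its diagonal columns i and n-1-i.
def Pre_solution (matrix : List (List Int)) : Prop :=
  ∀ i ∈ List.range matrix.length,
    2 * i ≠ matrix.length - 1 →
      max (i + 1) (matrix.length - i) ≤ (matrix.getD i []).length
instance (matrix : List (List Int)) : Decidable (Pre_solution matrix) := by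
  unfold Pre_solution; infer_instance

def pvWitness_solution : List (List Int) := [[1, 2], [3, 4]]

def Spec_solution (matrix : List (List Int)) (out : List (List Int)) : Prop := out = solution_alt matrix
instance (matrix : List (List Int)) (out : List (List Int)) : Decidable (Spec_solution matrix out) := by unfold Spec_solution; infer_instance

-- ===== CLAIM (what is proved, stated in full; the proofs are below) =====
def Claim_equal_solution : Prop := ∀ (matrix : List (List Int)), Dom_solution matrix → Pre_solution matrix → Spec_solution matrix (solution matrix)

-- ===== LEMMAS AND PROOFS =====

-- proof device: the effect of A's four assignments on row pair (s, e), one row at a time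
def stepB (n : Nat) (m : List (List Int)) (i : Nat) : List (List Int) :=
  let j := n - 1 - i
  let row := m.getD i []
  m.set i ((row.set i (row.getD j 0)).set j (row.getD i 0))

lemma getD_set_ne {α : Type} (l : List α) {i k : Nat} (a d : α) (h : i ≠ k) :
    (l.set i a).getD k d = l.getD k d := by
  simp [List.getD, List.getElem?_set_ne h]

lemma set_getD_self {α : Type} (l : List α) (i : Nat) (d : α) :
    l.set i (l.getD i d) = l := by
  by_cases h : i < l.length
  · simp [List.getD, List.getElem?_eq_getElem h]
  · exact List.set_eq_of_length_le (Nat.le_of_not_lt h)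

lemma getD_set_self {α : Type} (l : List α) {i : Nat} (a d : α) (h : i < l.length) :
    (l.set i a).getD i d = a := by
  simp [List.getD, List.getElem?_set_self h]

lemma chain_set {β : Type} (l : List (List β)) (i k : Nat) (a d : List β) (c : β) :
    (l.set i a).set i (((l.set i a).getD i d).set k c) = l.set i (a.set k c) := by
  by_cases h : i < l.length
  · rw [getD_set_self _ _ _ h, List.set_set]
  · have h' : l.length ≤ i := Nat.le_of_not_lt h
    rw [List.set_eq_of_length_le (by simpa using h'), List.set_eq_of_length_le h',
        List.set_eq_of_length_le h']

lemma stepB_comm (n : Nat) (m : List (List Int)) {i k : Nat} (h : i ≠ k) :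
    stepB n (stepB n m i) k = stepB n (stepB n m k) i := by
  simp only [stepB]
  rw [getD_set_ne _ _ _ h, getD_set_ne _ _ _ (Ne.symm h), List.set_comm _ _ h]

lemma stepB_self (n : Nat) (m : List (List Int)) (i : Nat) (h : n - 1 - i = i) :
    stepB n m i = m := by
  simp only [stepB, h, set_getD_self]

lemma foldl_stepB_comm (n : Nat) (l : List Nat) (m : List (List Int)) (e : Nat)
    (h : ∀ i ∈ l, i ≠ e) :
    l.foldl (stepB n) (stepB n m e) = stepB n (l.foldl (stepB n) m) e := by
  induction l generalizing m with
  | nil => rfl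
  | cons a t ih =>
    simp only [List.foldl_cons]
    rw [stepB_comm n m (Ne.symm (h a (by simp)))]
    exact ih _ (fun i hi => h i (by simp [hi]))

lemma swapOnce_eq (m : List (List Int)) (s e n : Nat) (hne : s ≠ e)
    (h1 : n - 1 - s = e) (h2 : n - 1 - e = s) :
    swapOnce m s e = stepB n (stepB n m s) e := by
  simp only [swapOnce, stepB, h1, h2]
  rw [chain_set, chain_set, getD_set_ne _ _ _ hne]
  congr 1
  exact List.set_comm _ _ hne

lemma loopA_eq (n : Nat) : ∀ (k : Nat) (m : List (List Int)) (s e : Nat),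
    e + 1 - s = k → s + e + 1 = n → s ≤ e + 1 →
    loopA m s e = (List.range' s k).foldl (stepB n) m := by
  intro k
  induction k using Nat.strong_induction_on with
  | _ k ih =>
    intro m s e hk hn hse
    by_cases hlt : s < e
    · rw [loopA]
      simp only [hlt, if_pos]
      rw [ih (k - 2) (by omega) _ (s + 1) (e - 1) (by omega) (by omega) (by omega)]
      rw [swapOnce_eq m s e n (by omega) (by omega) (by omega)]
      rw [foldl_stepB_comm n _ _ e (by
        intro i hi
        have := List.mem_range'_1.mp hi
        omega)]
      have hk2 : k = (k - 2) + 1 + 1 := by omega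
      rw [hk2, List.range'_succ]
      have hcat : List.range' (s + 1) ((k - 2) + 1) =
          List.range' (s + 1) (k - 2) ++ [e] := by
        rw [List.range'_1_concat]
        have : s + 1 + (k - 2) = e := by omega
        rw [this]
      rw [hcat]
      simp [List.foldl_append]
    · rw [loopA]
      simp only [hlt, ite_false]
      rcases Nat.lt_or_ge e s with hes | hes
      · have : k = 0 := by omega
        simp [this]
      · have : k = 1 := by omega
        subst this
        simp only [List.range'_one, List.foldl_cons, List.foldl_nil]
        rw [stepB_self n m s (by omega)]

-- A's two row rewrites for row i equal B's pure rebuild of that row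
lemma set_set_eq_mapIdx (row : List Int) (i j : Nat) :
    (row.set i (row.getD j 0)).set j (row.getD i 0) =
      row.mapIdx (fun k x =>
        if k = i then row.getD j 0 else if k = j then row.getD i 0 else x) := by
  apply List.ext_getElem
  · simp
  · intro k hk1 hk2
    have hklen : k < row.length := by simpa using hk1
    simp only [List.getElem_set, List.getElem_mapIdx]
    by_cases hkj : j = k
    · subst hkj
      by_cases hij : j = i
      · simp [hij]
      · simp [hij]
    · by_cases hki : i = k
      · subst hki
        simp [hkj]
      · simp [hkj, hki, Ne.symm hki, Ne.symm hkj]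

lemma stepB_eq_set_bRow (n : Nat) (m : List (List Int)) (i : Nat) :
    stepB n m i = m.set i (bRow n i (m.getD i [])) := by
  simp only [stepB, bRow]
  exact congrArg _ (set_set_eq_mapIdx (m.getD i []) i (n - 1 - i))

-- folding stepB over range k rebuilds exactly the first k rows
lemma foldl_stepB_range (n : Nat) (m : List (List Int)) :
    ∀ k : Nat, (List.range k).foldl (stepB n) m =
      m.mapIdx (fun i row => if i < k then bRow n i row else row) := by
  intro k
  induction k with
  | zero =>
    apply List.ext_getElem <;> simp
  | succ k ih =>
    rw [List.range_succ, List.foldl_append, List.foldl_cons, List.foldl_nil, ih,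
        stepB_eq_set_bRow]
    apply List.ext_getElem
    · simp
    · intro t ht1 ht2
      have htm : t < m.length := by simpa using ht1
      simp only [List.getElem_set, List.getElem_mapIdx]
      by_cases hkt : k = t
      · subst hkt
        have hg : (m.mapIdx (fun i row => if i < k then bRow n i row else row)).getD k [] =
            m[k] := by
          rw [List.getD, List.getElem?_eq_getElem (by simpa using htm)]
          simp
        rw [if_pos rfl, hg, if_pos (Nat.lt_succ_self k)]
      · have : (t < k) = (t < k + 1) := by
          apply propext; constructor <;> intro h <;> omega
        simp [hkt, this]

-- ===== VERDICT (by name: the statement is the Claim_ definition above) =====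
theorem solution_spec : Claim_equal_solution := by
  intro matrix _ _
  unfold Spec_solution solution solution_alt
  rcases matrix with _ | ⟨r, t⟩
  · rw [loopA]; rfl
  · rw [loopA_eq (r :: t).length (r :: t).length (r :: t) 0 ((r :: t).length - 1)
        (by simp) (by simp) (by omega)]
    rw [show List.range' 0 (r :: t).length = List.range (r :: t).length from
      (List.range_eq_range' ..).symm]
    rw [foldl_stepB_range]
    apply List.ext_getElem
    · simp
    · intro u hu1 hu2
      have hu : u < (r :: t).length := by simpa using hu1
      simp only [List.getElem_mapIdx]
      rw [if_pos hu]
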